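-- pv_equiv track=rewrite | github.com/tensorflow/models | research/mobilenet/tf1_loader/utils.py | _process_moving_average
-- ===== SOURCE A (Python) =====
-- from typing import Text, List, Dict, Tuple, Callable
--
-- def _process_moving_average(ma_terms: List[Text]) -> List[Text]:
--   """
--     MobilenetV2/Conv/BatchNorm/moving_variance
--     MobilenetV2/Conv/BatchNorm/moving_variance/ExponentialMovingAverage
--     MobilenetV3/expanded_conv_9/project/BatchNorm/moving_mean/ExponentialMovingAverage
--   Args:
--     ma_terms: a list of names related to moving average
--
--   Returns:
--     a list of names after de-duplicating
--   """
--
--   dedup_holder = dict()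
--   for item in ma_terms:
--     base_name = item
--     item_split = item.split('/')
--     if 'moving_' in item_split[-2]:
--       base_name = '/'.join(item_split[0:-1])
--
--     if ((base_name not in dedup_holder)
--         or (len(item) > len(dedup_holder[base_name]))):
--       dedup_holder[base_name] = item
--
--   return list(dedup_holder.values())
-- ===== SOURCE B (Python) =====
-- from typing import Text, List
--
-- def _process_moving_average(ma_terms: List[Text]) -> List[Text]:
--   groups = {}
--   for item in ma_terms:
--     base_name = item
--     item_split = item.split('/')
--     if 'moving_' in item_split[-2]:
--       base_name = '/'.join(item_split[0:-1])
--     groups.setdefault(base_name, []).append(item)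
--   return [max(group, key=len) for group in groups.values()]
-- ===== Notes on version B (the rewrite author's own statement) =====
-- stated objective: alternative
-- what changed: Replaces A's single running-best pass over a name->best dict by a group-then-reduce decomposition: one pass buckets all items per base name in insertion order, then each bucket is reduced with max(key=len), whose first-maximal rule matches A's strict-> tie-breaking.
import Mathlib
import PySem

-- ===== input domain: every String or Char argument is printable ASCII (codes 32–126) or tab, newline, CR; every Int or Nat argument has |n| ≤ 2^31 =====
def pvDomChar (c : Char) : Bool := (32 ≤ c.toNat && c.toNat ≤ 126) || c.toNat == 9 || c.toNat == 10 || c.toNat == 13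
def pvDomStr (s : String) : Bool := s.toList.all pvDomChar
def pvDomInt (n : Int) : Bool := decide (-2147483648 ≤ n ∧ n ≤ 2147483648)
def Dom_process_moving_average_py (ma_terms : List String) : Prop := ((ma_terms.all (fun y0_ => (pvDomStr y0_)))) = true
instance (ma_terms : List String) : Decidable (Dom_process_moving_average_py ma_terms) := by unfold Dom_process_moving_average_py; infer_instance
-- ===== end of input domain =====

-- B replaces A's running-best pass by a bucket-per-base-name pass followed by a max(key=len) reduce per bucket (alternative decomposition, same cost).


-- ===== PORT A =====
-- base_name computation shared verbatim by both Pythons: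
--   item_split = item.split('/'); if 'moving_' in item_split[-2]: base_name = '/'.join(item_split[0:-1]) else item
-- '/' is a nonempty separator so split? is always some (getD [] never fires);
-- item_split[-2] is a pyGetD whose default is unreachable under Pre_ (every item contains '/').
def pvBase (item : String) : String :=
  let item_split := (PySem.Str.split? item "/").getD []
  if PySem.Str.isIn "moving_" (PySem.List.pyGetD item_split (-2) "")
  then PySem.Str.join "/" (PySem.List.slice item_split (some 0) (some (-1)))
  else item

def process_moving_average_py (ma_terms : List String) : List String :=
  (ma_terms.foldl
    (fun dedup_holder item =>
      let base_name := pvBase item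
      if !dedup_holder.contains base_name
         || PySem.Str.len item > PySem.Str.len (dedup_holder.getD base_name "")
      then dedup_holder.insert base_name item
      else dedup_holder)
    PySem.Dict.empty).values

-- ===== PORT B =====
-- max(group, key=len): first element of maximal length (strict '>' keeps the earliest).
-- Groups are always nonempty, so the [] branch (Python max would raise) is unreachable.
def pvMaxLen : List String → String
  | [] => ""
  | h :: t => t.foldl (fun best x => if PySem.Str.len x > PySem.Str.len best then x else best) h

def process_moving_average_py_alt (ma_terms : List String) : List String :=
  ((ma_terms.foldl
      (fun groups item => groups.modify (pvBase item) [] (· ++ [item]))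
      PySem.Dict.empty).values).map pvMaxLen

-- ===== PRECONDITION & SPEC =====
-- Pre_ excludes exactly the inputs where Python A raises IndexError: an item with no '/'
-- splits into a single segment and item_split[-2] is out of range (B raises identically there).
def Pre_process_moving_average_py (ma_terms : List String) : Prop :=
  ∀ item ∈ ma_terms, PySem.Str.isIn "/" item = true
instance (ma_terms : List String) : Decidable (Pre_process_moving_average_py ma_terms) := by unfold Pre_process_moving_average_py; infer_instance

def pvWitness_process_moving_average_py : List String :=
  ["MobilenetV2/Conv/BatchNorm/moving_variance",
   "MobilenetV2/Conv/BatchNorm/moving_variance/ExponentialMovingAverage",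
   "MobilenetV2/Conv/weights"]

def Spec_process_moving_average_py (ma_terms : List String) (out : List String) : Prop := out = process_moving_average_py_alt ma_terms
instance (ma_terms : List String) (out : List String) : Decidable (Spec_process_moving_average_py ma_terms out) := by unfold Spec_process_moving_average_py; infer_instance

-- ===== CLAIM (what is proved, stated in full; the proofs are below) =====
def Claim_equal_process_moving_average_py : Prop := ∀ (ma_terms : List String), Dom_process_moving_average_py ma_terms → Pre_process_moving_average_py ma_terms → Spec_process_moving_average_py ma_terms (process_moving_average_py ma_terms)

-- ===== LEMMAS AND PROOFS =====

-- invariant relating A's best-so-far dict to B's group dict after the same prefix of items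
def pvInv (d : PySem.Dict String String) (g : PySem.Dict String (List String)) : Prop :=
  d.items = g.items.map (fun p => (p.1, pvMaxLen p.2))
  ∧ g.keys.Nodup
  ∧ ∀ p ∈ g.items, p.2 ≠ []

theorem pvMaxLen_append_singleton (v : List String) (hv : v ≠ []) (item : String) :
    pvMaxLen (v ++ [item])
      = if PySem.Str.len item > PySem.Str.len (pvMaxLen v) then item else pvMaxLen v := by
  cases v with
  | nil => exact absurd rfl hv
  | cons h t => simp [pvMaxLen, List.foldl_append]

theorem pvInv_keys_eq {d : PySem.Dict String String} {g : PySem.Dict String (List String)}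
    (h : pvInv d g) : d.keys = g.keys := by
  have : d.items.map (·.1) = g.items.map (·.1) := by
    rw [h.1, List.map_map]; rfl
  simpa [PySem.Dict.keys] using this

theorem pvInv_step (d : PySem.Dict String String) (g : PySem.Dict String (List String))
    (item : String) (h : pvInv d g) :
    pvInv
      (let base_name := pvBase item
       if !d.contains base_name
          || PySem.Str.len item > PySem.Str.len (d.getD base_name "")
       then d.insert base_name item else d)
      (g.modify (pvBase item) [] (· ++ [item])) := by
  obtain ⟨hitems, hnd, hne⟩ := h
  set b := pvBase item with hb
  have hkeys : d.keys = g.keys := pvInv_keys_eq ⟨hitems, hnd, hne⟩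
  have hcont : d.contains b = g.contains b := by
    by_cases hc : g.contains b = true
    · rw [hc]
      exact (PySem.Dict.contains_iff_mem_keys d b).2
        (hkeys ▸ (PySem.Dict.contains_iff_mem_keys g b).1 hc)
    · have hc' : g.contains b = false := by simpa using hc
      rw [hc']
      by_contra hd
      have hd' : d.contains b = true := by
        cases hdc : d.contains b
        · exact absurd hdc hd
        · rfl
      exact hc ((PySem.Dict.contains_iff_mem_keys g b).2
        (hkeys ▸ (PySem.Dict.contains_iff_mem_keys d b).1 hd'))
  show pvInv _ (g.insert b ((g.getD b []) ++ [item]))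
  by_cases hc : g.contains b = true
  · -- key already present: g holds some nonempty group v, d holds pvMaxLen v
    have hbmem : b ∈ g.keys := (PySem.Dict.contains_iff_mem_keys g b).1 hc
    have : ∃ v, (b, v) ∈ g.items := by
      simp only [PySem.Dict.keys, List.mem_map] at hbmem
      obtain ⟨p, hp, hpe⟩ := hbmem
      exact ⟨p.2, by simpa [← hpe] using hp⟩
    obtain ⟨v, hv⟩ := this
    have hvne : v ≠ [] := hne _ hv
    have hgv : g.getD b [] = v := PySem.Dict.getD_of_mem_items g hv hnd []
    have hdmem : (b, pvMaxLen v) ∈ d.items := by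
      rw [hitems]; exact List.mem_map.2 ⟨(b, v), hv, rfl⟩
    have hdnd : d.keys.Nodup := hkeys ▸ hnd
    have hdv : d.getD b "" = pvMaxLen v := PySem.Dict.getD_of_mem_items d hdmem hdnd ""
    have hc' : d.contains b = true := by rw [hcont]; exact hc
    have hgitems := PySem.Dict.items_insert_of_contains g ((g.getD b []) ++ [item]) hc
    have hval : pvMaxLen (v ++ [item])
        = if PySem.Str.len item > PySem.Str.len (pvMaxLen v) then item else pvMaxLen v :=
      pvMaxLen_append_singleton v hvne item
    -- the entry at key b maps to the updated best; all other entries are unchanged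
    have hmain : (g.insert b ((g.getD b []) ++ [item])).items.map (fun p => (p.1, pvMaxLen p.2))
        = d.items.map (fun p => if p.1 == b then (b, if PySem.Str.len item > PySem.Str.len (pvMaxLen v) then item else pvMaxLen v) else p) := by
      rw [hgitems, hitems, List.map_map, List.map_map]
      refine List.map_congr_left (fun p hp => ?_)
      by_cases hpb : p.1 = b
      · have h1 : (b, p.2) ∈ g.items := by rw [← hpb]; simpa using hp
        have h2 := PySem.Dict.getD_of_mem_items g h1 hnd []
        have hpv : p.2 = v := by rw [hgv] at h2; exact h2.symm
        rw [hgv]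
        simp [Function.comp, hpb, hval]
      · simp [Function.comp, hpb]
    have hsame : ∀ p ∈ d.items, p.1 = b → p = (b, pvMaxLen v) := by
      intro p hp hpb
      have h1 : (b, p.2) ∈ d.items := by rw [← hpb]; simpa using hp
      have h2 := PySem.Dict.getD_of_mem_items d h1 hdnd ""
      have : p.2 = pvMaxLen v := by rw [hdv] at h2; exact h2.symm
      calc p = (p.1, p.2) := rfl
        _ = (b, pvMaxLen v) := by rw [hpb, this]
    refine ⟨?_, ?_, ?_⟩
    · -- items relation
      dsimp only
      split_ifs with hcond
      · -- A replaced its best: the condition forces len item > len (pvMaxLen v)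
        have hlen : PySem.Str.len item > PySem.Str.len (pvMaxLen v) := by
          rw [hc'] at hcond
          rw [← hdv]
          simpa using hcond
        rw [PySem.Dict.items_insert_of_contains d item hc', hmain, if_pos hlen]
      · -- A kept its best: the group maximum is unchanged
        have hlen : ¬ PySem.Str.len item > PySem.Str.len (pvMaxLen v) := by
          rw [hc'] at hcond
          rw [← hdv]
          simpa using hcond
        rw [hmain, if_neg hlen]
        have : d.items.map (fun p => if p.1 == b then (b, pvMaxLen v) else p)
            = d.items.map id := by
          refine List.map_congr_left (fun p hp => ?_)
          by_cases hpb : p.1 = b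
          · simp only [hpb, beq_self_eq_true, if_true, id]
            exact (hsame p hp hpb).symm
          · simp [hpb]
        rw [this, List.map_id]
    · rw [PySem.Dict.keys_insert_of_contains g _ hc]; exact hnd
    · intro p hp
      rcases (PySem.Dict.mem_items_insert g _ _ p).1 hp with hpe | ⟨hp', _⟩
      · rw [hpe]; simp
      · exact hne _ hp'
  · -- fresh key: both sides append a new entry
    have hc' : g.contains b = false := by simpa using hc
    rw [hc'] at hcont
    have hg0 : g.getD b [] = [] := PySem.Dict.getD_of_not_contains g [] hc'
    have hbnk : b ∉ g.keys := fun hm => by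
      rw [(PySem.Dict.contains_iff_mem_keys g b).2 hm] at hc'; cases hc'
    refine ⟨?_, ?_, ?_⟩
    · dsimp only
      split_ifs with hcond
      · rw [PySem.Dict.items_insert_of_not_contains d item hcont,
            PySem.Dict.items_insert_of_not_contains g _ hc', hitems, List.map_append, hg0]
        simp [pvMaxLen]
      · exact absurd (by rw [hcont]; simp) hcond
    · rw [PySem.Dict.keys_insert_of_not_contains g _ hc']
      refine List.nodup_append.2 ⟨hnd, List.nodup_singleton b, ?_⟩
      intro x hx y hy
      rw [List.mem_singleton] at hy
      subst hy
      exact fun hxb => hbnk (hxb ▸ hx)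
    · intro p hp
      rcases (PySem.Dict.mem_items_insert g _ _ p).1 hp with hpe | ⟨hp', _⟩
      · rw [hpe, hg0]; simp
      · exact hne _ hp'

theorem pvInv_foldl (l : List String) (d : PySem.Dict String String)
    (g : PySem.Dict String (List String)) (h : pvInv d g) :
    pvInv
      (l.foldl (fun dedup_holder item =>
        let base_name := pvBase item
        if !dedup_holder.contains base_name
           || PySem.Str.len item > PySem.Str.len (dedup_holder.getD base_name "")
        then dedup_holder.insert base_name item else dedup_holder) d)
      (l.foldl (fun groups item => groups.modify (pvBase item) [] (· ++ [item])) g) := by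
  induction l generalizing d g with
  | nil => exact h
  | cons x xs ih => exact ih _ _ (pvInv_step d g x h)

theorem pvInv_empty : pvInv (PySem.Dict.empty) (PySem.Dict.empty) := by
  refine ⟨rfl, ?_, ?_⟩ <;> simp [PySem.Dict.empty, PySem.Dict.keys]

-- ===== VERDICT (by name: the statement is the Claim_ definition above) =====
theorem process_moving_average_py_spec : Claim_equal_process_moving_average_py := by
  intro ma_terms _ _
  unfold Spec_process_moving_average_py process_moving_average_py process_moving_average_py_alt
  have h := pvInv_foldl ma_terms PySem.Dict.empty PySem.Dict.empty pvInv_empty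
  rw [PySem.Dict.values, PySem.Dict.values, h.1, List.map_map, List.map_map]
  rfl
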